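-- pv_equiv track=rewrite | github.com/johnShreyas/Universal_studentOS-AI | helpers.py | ai_offered_pdf
-- ===== SOURCE A (Python) =====
-- def ai_offered_pdf(messages: list) -> bool:
--     """True only if the last AI message before current input offered a PDF."""
--     user_skipped = False
--     for msg in reversed(messages):
--         if msg["role"] == "user" and not user_skipped:
--             user_skipped = True
--             continue
--         if msg["role"] == "assistant":
--             return "would you like me to save these as a pdf" in msg["content"].lower()
--         if msg["role"] == "user":
--             return False
--     return False
-- ===== SOURCE B (Python) =====
-- def ai_offered_pdf(messages: list) -> bool:
--     """True only if the last AI message before current input offered a PDF."""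
--     convo = [m for m in messages if m["role"] in ("assistant", "user")]
--     if convo and convo[-1]["role"] == "user":
--         convo = convo[:-1]
--     if convo and convo[-1]["role"] == "assistant":
--         return "would you like me to save these as a pdf" in convo[-1]["content"].lower()
--     return False
-- ===== Notes on version B (the rewrite author's own statement) =====
-- stated objective: simpler
-- what changed: Replaces the reverse loop with a user_skipped flag by a filter-to-conversation-roles comprehension followed by drop-one-trailing-user and a single tail inspection.
-- outside the precondition, e.g. on ai_offered_pdf([{'x': '1'}, {'role': 'assistant', 'content': 'hi'}]): A returns False, B raises KeyError
import Mathlib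
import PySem

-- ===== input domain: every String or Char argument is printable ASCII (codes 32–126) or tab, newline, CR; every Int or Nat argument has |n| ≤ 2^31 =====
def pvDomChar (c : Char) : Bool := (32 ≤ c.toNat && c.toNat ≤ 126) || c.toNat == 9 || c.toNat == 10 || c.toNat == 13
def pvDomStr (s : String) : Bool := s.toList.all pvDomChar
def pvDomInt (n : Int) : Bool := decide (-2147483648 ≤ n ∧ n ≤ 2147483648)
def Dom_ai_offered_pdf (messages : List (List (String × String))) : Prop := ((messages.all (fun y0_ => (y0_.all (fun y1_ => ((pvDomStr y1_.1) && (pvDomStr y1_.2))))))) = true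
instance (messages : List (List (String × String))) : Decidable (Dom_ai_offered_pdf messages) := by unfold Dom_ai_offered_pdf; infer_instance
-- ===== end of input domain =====

-- B replaces A's reverse scan with a user_skipped flag by a filter-then-tail-inspection
-- decomposition (objective: simpler).

-- msg["role"] / msg["content"] (assoc-list dict, first match); default "" is only ever
-- reached outside Pre_, where the Python raises KeyError.
def pvRole (m : List (String × String)) : String := ((PySem.Dict.mk m).get? "role").getD ""
def pvContent (m : List (String × String)) : String := ((PySem.Dict.mk m).get? "content").getD ""

def pvConvoPred (m : List (String × String)) : Bool :=
  pvRole m == "assistant" || pvRole m == "user"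

-- ===== PORT A =====
-- the 'for msg in reversed(messages)' loop with its user_skipped flag and early returns
def aiGoA : List (List (String × String)) → Bool → Bool
  | [], _ => false
  | m :: rest, userSkipped =>
    if pvRole m == "user" && !userSkipped then aiGoA rest true
    else if pvRole m == "assistant" then
      PySem.Str.isIn "would you like me to save these as a pdf" (PySem.Str.lower (pvContent m))
    else if pvRole m == "user" then false
    else aiGoA rest userSkipped

def ai_offered_pdf (messages : List (List (String × String))) : Bool :=
  aiGoA messages.reverse false

-- ===== PORT B =====
def ai_offered_pdf_alt (messages : List (List (String × String))) : Bool :=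
  let convo := messages.filter pvConvoPred
  let convo2 :=
    if (match convo.getLast? with
        | some m => pvRole m == "user"
        | none => false) then convo.dropLast else convo
  match convo2.getLast? with
  | some m =>
    if pvRole m == "assistant" then
      PySem.Str.isIn "would you like me to save these as a pdf" (PySem.Str.lower (pvContent m))
    else false
  | none => false

-- ===== PRECONDITION & SPEC =====
-- the message whose "content" A would read: last conversational message, ignoring one trailing user message
def pvDecision (messages : List (List (String × String))) : Option (List (String × String)) :=
  let convo := messages.filter pvConvoPred
  match convo.getLast? with
  | some m => if pvRole m == "user" then convo.dropLast.getLast? else some m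
  | none => none

-- Pre_ excludes inputs with a message lacking a "role" key (A reads roles lazily from the end
-- and can return before reaching such a message, while B's whole-list filter reads every role
-- and raises KeyError there) and inputs whose decision assistant message lacks "content"
-- (there BOTH programs raise KeyError).
def Pre_ai_offered_pdf (messages : List (List (String × String))) : Prop :=
  (messages.all (fun m => ((PySem.Dict.mk m).get? "role").isSome)) = true ∧
  ((pvDecision messages).all (fun m =>
      pvRole m == "assistant" → ((PySem.Dict.mk m).get? "content").isSome)) = true

instance (messages : List (List (String × String))) : Decidable (Pre_ai_offered_pdf messages) := by
  unfold Pre_ai_offered_pdf; infer_instance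

def pvWitness_ai_offered_pdf : (List (List (String × String))) :=
  [[("role", "user"), ("content", "make a pdf")],
   [("role", "assistant"), ("content", "Would you like me to save these as a PDF?")]]

def Spec_ai_offered_pdf (messages : List (List (String × String))) (out : Bool) : Prop := out = ai_offered_pdf_alt messages
instance (messages : List (List (String × String))) (out : Bool) : Decidable (Spec_ai_offered_pdf messages out) := by unfold Spec_ai_offered_pdf; infer_instance

-- ===== CLAIM (what is proved, stated in full; the proofs are below) =====
def Claim_equal_ai_offered_pdf : Prop := ∀ (messages : List (List (String × String))), Dom_ai_offered_pdf messages → Pre_ai_offered_pdf messages → Spec_ai_offered_pdf messages (ai_offered_pdf messages)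

-- ===== LEMMAS AND PROOFS =====

-- the common denominator: a head-first judgement of the filtered, reversed conversation
def pvJudge : List (List (String × String)) → Bool → Bool
  | [], _ => false
  | m :: rest, userSkipped =>
    if pvRole m == "user" then (if userSkipped then false else pvJudge rest true)
    else
      PySem.Str.isIn "would you like me to save these as a pdf" (PySem.Str.lower (pvContent m))

-- A's loop equals the judgement of the filtered list (A skips non-conversational roles)
theorem aiGoA_eq_judge_filter (l : List (List (String × String))) :
    ∀ sk, aiGoA l sk = pvJudge (l.filter pvConvoPred) sk := by
  induction l with
  | nil => intro sk; rfl
  | cons m rest ih =>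
    intro sk
    by_cases hp : pvConvoPred m = true
    · simp only [List.filter_cons, hp, if_true]
      by_cases hu : (pvRole m == "user") = true
      · have ha : (pvRole m == "assistant") = false := by
          have := eq_of_beq hu; simp [this]
        cases sk with
        | false => simp [aiGoA, pvJudge, hu, ih]
        | true => simp [aiGoA, pvJudge, hu, ha]
      · have ha : (pvRole m == "assistant") = true := by
          unfold pvConvoPred at hp
          rcases Bool.or_eq_true_iff.mp hp with h | h
          · exact h
          · exact absurd h hu
        simp [aiGoA, pvJudge, hu, ha]
    · have hu : (pvRole m == "user") = false := by
        unfold pvConvoPred at hp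
        exact Bool.eq_false_iff.mpr fun h => hp (Bool.or_eq_true_iff.mpr (Or.inr h))
      have ha : (pvRole m == "assistant") = false := by
        unfold pvConvoPred at hp
        exact Bool.eq_false_iff.mpr fun h => hp (Bool.or_eq_true_iff.mpr (Or.inl h))
      simp [aiGoA, hu, ha, hp, ih]

-- B's tail inspection of a conversational list equals the judgement of its reverse
theorem tail_eq_judge_rev (r : List (List (String × String)))
    (hall : ∀ m ∈ r, pvConvoPred m = true) :
    (let convo := r.reverse
     let convo2 :=
       if (match convo.getLast? with
           | some m => pvRole m == "user"
           | none => false) then convo.dropLast else convo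
     match convo2.getLast? with
     | some m =>
       if pvRole m == "assistant" then
         PySem.Str.isIn "would you like me to save these as a pdf" (PySem.Str.lower (pvContent m))
       else false
     | none => false) = pvJudge r false := by
  cases r with
  | nil => rfl
  | cons m rest =>
    have hm := hall m (List.mem_cons_self ..)
    simp only [List.reverse_cons, List.getLast?_concat, List.dropLast_concat]
    by_cases hu : (pvRole m == "user") = true
    · simp only [hu, if_true, pvJudge, Bool.if_false_right]
      cases rest with
      | nil => rfl
      | cons m' rest' =>
        have hm' := hall m' (by simp)
        simp only [List.reverse_cons, List.getLast?_concat, pvJudge]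
        by_cases hu' : (pvRole m' == "user") = true
        · have ha' : (pvRole m' == "assistant") = false := by
            have := eq_of_beq hu'
            simp [this]
          simp [hu', ha']
        · have ha' : (pvRole m' == "assistant") = true := by
            unfold pvConvoPred at hm'
            rcases Bool.or_eq_true_iff.mp hm' with h | h
            · exact h
            · exact absurd h hu'
          simp [hu', ha']
    · have ha : (pvRole m == "assistant") = true := by
        unfold pvConvoPred at hm
        rcases Bool.or_eq_true_iff.mp hm with h | h
        · exact h
        · exact absurd h hu
      simp [hu, ha, pvJudge]

-- ===== VERDICT (by name: the statement is the Claim_ definition above) =====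
theorem ai_offered_pdf_spec : Claim_equal_ai_offered_pdf := by
  intro messages _ _
  unfold Spec_ai_offered_pdf ai_offered_pdf ai_offered_pdf_alt
  rw [aiGoA_eq_judge_filter, List.filter_reverse]
  have h := tail_eq_judge_rev (messages.filter pvConvoPred).reverse
    (by intro m hm
        rw [List.mem_reverse] at hm
        exact (List.mem_filter.mp hm).2)
  simp only [List.reverse_reverse] at h
  rw [← h]
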